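-- pv_equiv track=rewrite | github.com/Algomius/jeuVideo | 1. Enigme de Tirna Scithe/tirna.py | combinaison
-- ===== SOURCE A (Python) =====
-- def combinaison(possible):
--     combi = []
--     for i in range(len(possible)):
--         for j in range(i+1, len(possible)):
--             for k in range(j+1, len(possible)):
--                 for l in range(k+1, len(possible)):
--                     combi.append([possible[i], possible[j], possible[k], possible[l]])
--     return combi
-- ===== SOURCE B (Python) =====
-- def combinaison(possible):
--     def combs(k, xs):
--         if k == 0:
--             return [[]]
--         if not xs:
--             return []
--         head, tail = xs[0], xs[1:]
--         return [[head] + rest for rest in combs(k - 1, tail)] + combs(k, tail)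
--     return combs(4, possible)
-- ===== Notes on version B (the rewrite author's own statement) =====
-- stated objective: simpler
-- what changed: Replaces the four fixed nested index loops with a single recursive combs(k, xs) helper (take-head or skip-head structural recursion) that generalises to any k and emits the same lists in the same order.
import Mathlib
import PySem

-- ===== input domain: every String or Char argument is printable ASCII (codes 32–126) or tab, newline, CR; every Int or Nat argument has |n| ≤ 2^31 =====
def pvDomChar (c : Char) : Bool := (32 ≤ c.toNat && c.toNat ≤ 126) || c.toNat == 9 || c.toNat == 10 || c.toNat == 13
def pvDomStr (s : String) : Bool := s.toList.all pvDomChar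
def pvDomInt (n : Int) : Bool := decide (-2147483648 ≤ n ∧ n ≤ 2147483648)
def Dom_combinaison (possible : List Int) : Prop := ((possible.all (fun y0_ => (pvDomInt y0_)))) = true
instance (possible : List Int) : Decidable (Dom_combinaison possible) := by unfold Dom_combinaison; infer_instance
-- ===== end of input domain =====

-- B replaces A's four fixed nested index loops by one recursive take-or-skip
-- combinations helper (objective: simpler, same output order).


-- ===== PORT A =====
def combinaison (possible : List Int) : List (List Int) :=
  (PySem.List.pyRange 0 (possible.length : Int) 1).foldl (fun combi i =>
    (PySem.List.pyRange (i+1) (possible.length : Int) 1).foldl (fun combi j =>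
      (PySem.List.pyRange (j+1) (possible.length : Int) 1).foldl (fun combi k =>
        (PySem.List.pyRange (k+1) (possible.length : Int) 1).foldl (fun combi l =>
          combi ++ [[PySem.List.pyGetD possible i 0, PySem.List.pyGetD possible j 0,
                     PySem.List.pyGetD possible k 0, PySem.List.pyGetD possible l 0]])
          combi) combi) combi) []

-- ===== PORT B =====
-- combs k xs : all k-element subsequences of xs, take-head branch first
def pvCombs : Nat → List Int → List (List Int)
  | 0, _ => [[]]
  | _+1, [] => []
  | k+1, x :: tail => (pvCombs k tail).map (fun rest => x :: rest) ++ pvCombs (k+1) tail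

def combinaison_alt (possible : List Int) : List (List Int) := pvCombs 4 possible

-- ===== PRECONDITION & SPEC =====
def Spec_combinaison (possible : List Int) (out : List (List Int)) : Prop := out = combinaison_alt possible
instance (possible : List Int) (out : List (List Int)) : Decidable (Spec_combinaison possible out) := by unfold Spec_combinaison; infer_instance

-- ===== CLAIM (what is proved, stated in full; the proofs are below) =====
def Claim_equal_combinaison : Prop := ∀ (possible : List Int), Dom_combinaison possible → Spec_combinaison possible (combinaison possible)

-- ===== LEMMAS AND PROOFS =====

-- index-based nested flatMap form of A, depth r, starting index s
def pvIdx (xs : List Int) : Nat → Int → List (List Int)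
  | 0, _ => [[]]
  | r+1, s => (PySem.List.pyRange s (xs.length : Int) 1).flatMap
      (fun i => (pvIdx xs r (i+1)).map (fun t => PySem.List.pyGetD xs i 0 :: t))

lemma pvIdx_eq_combs (xs : List Int) :
    ∀ d r (s : Nat), xs.length - s ≤ d → pvIdx xs r (s : Int) = pvCombs r (xs.drop s) := by
  intro d
  induction d with
  | zero =>
    intro r s hs
    have hdrop : xs.drop s = [] := List.drop_eq_nil_of_le (by omega)
    cases r with
    | zero => simp [pvIdx, pvCombs]
    | succ r =>
      have hnil : PySem.List.pyRange (s : Int) (xs.length : Int) 1 = [] :=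
        PySem.List.pyRange_one_eq_nil (by exact_mod_cast (by omega : xs.length ≤ s))
      simp [pvIdx, hnil, hdrop, pvCombs]
  | succ d ih =>
    intro r s hs
    cases r with
    | zero => simp [pvIdx, pvCombs]
    | succ r =>
      by_cases h : s < xs.length
      · have hcons : PySem.List.pyRange (s : Int) (xs.length : Int) 1 =
            (s : Int) :: PySem.List.pyRange ((s : Int) + 1) (xs.length : Int) 1 :=
          PySem.List.pyRange_one_cons (by exact_mod_cast h)
        have hget : PySem.List.pyGetD xs (s : Int) 0 = xs[s] := by
          rw [PySem.List.pyGetD_natCast]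
          exact List.getD_eq_getElem _ _ h
        have hdrop : xs.drop s = xs[s] :: xs.drop (s+1) :=
          List.drop_eq_getElem_cons h
        have hcast : ((s : Int) + 1) = ((s + 1 : Nat) : Int) := by push_cast; ring
        calc pvIdx xs (r+1) (s : Int)
            = (pvIdx xs r ((s:Int)+1)).map (fun t => PySem.List.pyGetD xs (s:Int) 0 :: t)
              ++ pvIdx xs (r+1) ((s:Int)+1) := by
              rw [pvIdx, hcons]; simp [List.flatMap_cons]; rfl
          _ = (pvCombs r (xs.drop (s+1))).map (fun t => xs[s] :: t)
              ++ pvCombs (r+1) (xs.drop (s+1)) := by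
              rw [hget, hcast, ih r (s+1) (by omega), ih (r+1) (s+1) (by omega)]
          _ = pvCombs (r+1) (xs.drop s) := by rw [hdrop]; rfl
      · have hnil : PySem.List.pyRange (s : Int) (xs.length : Int) 1 = [] :=
          PySem.List.pyRange_one_eq_nil (by exact_mod_cast (by omega : xs.length ≤ s))
        have hdrop : xs.drop s = [] := List.drop_eq_nil_of_le (by omega)
        simp [pvIdx, hnil, hdrop, pvCombs]

lemma combinaison_eq_pvIdx (xs : List Int) : combinaison xs = pvIdx xs 4 0 := by
  unfold combinaison
  simp only [PySem.List.foldl_append_singleton_eq_map, PySem.List.foldl_append_eq_flatMap]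
  simp [pvIdx, List.map_flatMap, List.map_map, Function.comp_def, ← List.map_eq_flatMap]

-- ===== VERDICT (by name: the statement is the Claim_ definition above) =====
theorem combinaison_spec : Claim_equal_combinaison := by
  intro possible _
  unfold Spec_combinaison combinaison_alt
  have h := pvIdx_eq_combs possible possible.length 4 0 (by omega)
  rw [combinaison_eq_pvIdx]
  simpa using h
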